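-- pv_equiv track=rewrite | github.com/AndreTMV/Python | Project Euler/First_100/problem_4.py | largest_three_digit_palindromic_refactor
-- ===== SOURCE A (Python) =====
-- def reverse(number1: int, number2: int) -> int:
--     """TODO: Docstring for reverse.
--
--                     :arg1: number
--                     :returns: the reverse of that number ex: 123 -> 321
--
--                     """
--     number: int = number1 * number2
--     reverse_number: int = 0
--     while number > 0:
--         reverse_number = (reverse_number * 10) + (number % 10)
--         number = number // 10
--     return reverse_number
--
-- def is_palindrome(number1: int, number2: int) -> bool:
--     """TODO: Docstring for is_prime.
--
--                     :number1,number2: check if the product of this factors is a palindrome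
--                     :returns: true if it is a  palindrome
--
--                     """
--     return reverse(number1, number2) == number1 * number2
--
-- def largest_three_digit_palindromic_refactor(limit: int) -> int:
--     """TODO: Docstring for largest_three_digit_palindromic_refactor.
--
--                     :arg1: TODO
--                     :returns: TODO
--
--                     """
--     largest_palindromic: int = 0
--     first_number: int = limit
--     while first_number > 0:
--         second_number: int = first_number
--         while second_number > 0:
--             if first_number*second_number <= largest_palindromic:
--                 break
--             if(is_palindrome(first_number, second_number)):
--                 largest_palindromic = first_number*second_number
--             second_number -= 1
--         first_number -= 1
--
--     return largest_palindromic
-- ===== SOURCE B (Python) =====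
-- def _rev(x: int) -> int:
--     r = 0
--     while x > 0:
--         r = r * 10 + x % 10
--         x //= 10
--     return r
--
--
-- def _num_digits(n: int) -> int:
--     d = 0
--     while n > 0:
--         d += 1
--         n //= 10
--     return d
--
--
-- def _palindromes_desc(n):
--     """Yield every decimal palindrome in [1, n] in strictly descending order."""
--     for l in range(_num_digits(n), 0, -1):
--         h = (l + 1) // 2
--         base = 10 ** (h - 1) if l % 2 else 10 ** h
--         start = min(10 ** h - 1, n // base)
--         for half in range(start, 10 ** (h - 1) - 1, -1):
--             p = half * base + (_rev(half // 10) if l % 2 else _rev(half))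
--             if p <= n:
--                 yield p
--
--
-- def _has_factor_pair(p: int, limit: int) -> bool:
--     """True iff p = a*b for some 1 <= b <= a <= limit (scan the larger factor)."""
--     a = limit
--     while a * a >= p:
--         if p % a == 0:
--             return True
--         a -= 1
--     return False
--
--
-- def largest_three_digit_palindromic_refactor(limit: int) -> int:
--     if limit <= 0:
--         return 0
--     for p in _palindromes_desc(limit * limit):
--         if _has_factor_pair(p, limit):
--             return p
--     return 0
-- ===== Notes on version B (the rewrite author's own statement) =====
-- stated objective: faster
-- what changed: Instead of A's pruned double loop over all factor pairs, B enumerates decimal palindromes in descending order (built from their half digits) and returns the first one that has a divisor a with a*a >= p and both cofactors <= limit.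
import Mathlib
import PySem

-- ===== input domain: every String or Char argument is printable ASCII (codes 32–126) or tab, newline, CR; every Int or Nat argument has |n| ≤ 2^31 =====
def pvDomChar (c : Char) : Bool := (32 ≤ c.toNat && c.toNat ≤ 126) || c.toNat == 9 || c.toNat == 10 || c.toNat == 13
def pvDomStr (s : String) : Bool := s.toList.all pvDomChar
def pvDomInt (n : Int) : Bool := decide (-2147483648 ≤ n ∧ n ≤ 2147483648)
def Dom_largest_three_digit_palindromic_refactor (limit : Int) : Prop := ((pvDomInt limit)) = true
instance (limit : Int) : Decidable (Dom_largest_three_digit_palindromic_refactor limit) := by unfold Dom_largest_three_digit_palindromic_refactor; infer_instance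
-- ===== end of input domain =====

/- B replaces A's quadratic scan over factor pairs by enumerating decimal palindromes in
   descending order and returning the first one that factors as a*b with 1 ≤ b ≤ a ≤ limit
   (objective: faster). -/



-- ===== PORT A =====
-- while-loop of reverse(): reverse_number accumulator over number's decimal digits
def pvRevLoopA (number rev : Int) : Int :=
  if h : 0 < number then
    pvRevLoopA (PySem.Int.floordiv number 10) (rev * 10 + PySem.Int.mod number 10)
  else rev
termination_by number.toNat
decreasing_by
  have h1 : PySem.Int.floordiv number 10 = number / 10 := PySem.Int.floordiv_eq_ediv_of_pos (by norm_num)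
  have h2 : number / 10 < number := by
    have := Int.ediv_lt_iff_lt_mul (a := number) (b := number) (c := 10) (by norm_num)
    omega
  have h3 : 0 ≤ number / 10 := Int.ediv_nonneg (le_of_lt h) (by norm_num)
  omega

def pvReverse (number1 number2 : Int) : Int := pvRevLoopA (number1 * number2) 0

def pvIsPalindrome (number1 number2 : Int) : Bool := pvReverse number1 number2 == number1 * number2

-- inner while-loop over second_number, with the 'break' as an early return of largest
def pvInnerA (first second largest : Int) : Int :=
  if h : 0 < second then
    if first * second ≤ largest then largest
    else if pvIsPalindrome first second then pvInnerA first (second - 1) (first * second)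
    else pvInnerA first (second - 1) largest
  else largest
termination_by second.toNat
decreasing_by all_goals omega

-- outer while-loop over first_number
def pvOuterA (first largest : Int) : Int :=
  if h : 0 < first then pvOuterA (first - 1) (pvInnerA first first largest) else largest
termination_by first.toNat
decreasing_by omega

def largest_three_digit_palindromic_refactor (limit : Int) : Int := pvOuterA limit 0

-- ===== PORT B =====
-- _rev: digit reversal of a single number
def pvRevB (x r : Int) : Int :=
  if h : 0 < x then pvRevB (PySem.Int.floordiv x 10) (r * 10 + PySem.Int.mod x 10) else r
termination_by x.toNat
decreasing_by
  have h1 : PySem.Int.floordiv x 10 = x / 10 := PySem.Int.floordiv_eq_ediv_of_pos (by norm_num)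
  have h2 : x / 10 < x := by
    have := Int.ediv_lt_iff_lt_mul (a := x) (b := x) (c := 10) (by norm_num)
    omega
  have h3 : 0 ≤ x / 10 := Int.ediv_nonneg (le_of_lt h) (by norm_num)
  omega

-- _num_digits: count of decimal digits
def pvNumDigits (n d : Int) : Int :=
  if h : 0 < n then pvNumDigits (PySem.Int.floordiv n 10) (d + 1) else d
termination_by n.toNat
decreasing_by
  have h1 : PySem.Int.floordiv n 10 = n / 10 := PySem.Int.floordiv_eq_ediv_of_pos (by norm_num)
  have h2 : n / 10 < n := by
    have := Int.ediv_lt_iff_lt_mul (a := n) (b := n) (c := 10) (by norm_num)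
    omega
  have h3 : 0 ≤ n / 10 := Int.ediv_nonneg (le_of_lt h) (by norm_num)
  omega

-- _palindromes_desc: the generator, ported as the list it yields.
-- Python's 10 ** e is ported as (10 : Int) ^ e.toNat, exact here since every
-- exponent in range(l,0,-1) scope satisfies e >= 0.
def pvPalindromesDesc (n : Int) : List Int :=
  (PySem.List.pyRange (pvNumDigits n 0) 0 (-1)).flatMap (fun l =>
    let h := PySem.Int.floordiv (l + 1) 2
    let base : Int :=
      if PySem.Int.mod l 2 ≠ 0 then (10 : Int) ^ (h - 1).toNat else (10 : Int) ^ h.toNat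
    let start : Int := min ((10 : Int) ^ h.toNat - 1) (PySem.Int.floordiv n base)
    (PySem.List.pyRange start ((10 : Int) ^ (h - 1).toNat - 1) (-1)).filterMap
      (fun half =>
        let p : Int :=
          half * base +
            (if PySem.Int.mod l 2 ≠ 0 then pvRevB (PySem.Int.floordiv half 10) 0
             else pvRevB half 0)
        if p ≤ n then some p else none))

-- _has_factor_pair: while a*a >= p, scanning a downward; fuel lim.toNat + 1 covers
-- every iteration the Python loop performs (a descends from lim and the loop stops
-- at latest at a = 0 once p >= 1, which holds on every call site).
def pvHfLoop (p : Int) : Nat → Int → Bool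
  | 0, _ => false
  | fuel + 1, a =>
    if p ≤ a * a then
      (if PySem.Int.mod p a == 0 then true else pvHfLoop p fuel (a - 1))
    else false

def pvHasFactorPair (p lim : Int) : Bool := pvHfLoop p (lim.toNat + 1) lim

-- main: first palindrome (descending) that factors as a*b with 1 <= b <= a <= limit
def largest_three_digit_palindromic_refactor_alt (limit : Int) : Int :=
  if limit ≤ 0 then 0
  else
    match (pvPalindromesDesc (limit * limit)).find? (fun p => pvHasFactorPair p limit) with
    | some p => p
    | none => 0

-- ===== PRECONDITION & SPEC =====
def Spec_largest_three_digit_palindromic_refactor (limit : Int) (out : Int) : Prop := out = largest_three_digit_palindromic_refactor_alt limit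
instance (limit : Int) (out : Int) : Decidable (Spec_largest_three_digit_palindromic_refactor limit out) := by unfold Spec_largest_three_digit_palindromic_refactor; infer_instance

-- ===== CLAIM (what is proved, stated in full; the proofs are below) =====
def Claim_equal_largest_three_digit_palindromic_refactor : Prop := ∀ (limit : Int), Dom_largest_three_digit_palindromic_refactor limit → Spec_largest_three_digit_palindromic_refactor limit (largest_three_digit_palindromic_refactor limit)

-- ===== LEMMAS AND PROOFS =====

/- Nat-level digit reversal (closed form via Mathlib digits) and the two key predicates. -/
def pvRevNat (n : Nat) : Nat := Nat.ofDigits 10 (Nat.digits 10 n).reverse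

def pvPal (p : Nat) : Prop := pvRevNat p = p

def pvFact (lim p : Nat) : Prop := ∃ a b : Nat, 1 ≤ b ∧ b ≤ a ∧ a ≤ lim ∧ a * b = p

/- Nat mirrors of A's loops. -/
def pvInnerN (a : Nat) : Nat → Nat → Nat
  | 0, L => L
  | b + 1, L =>
    if a * (b + 1) ≤ L then L
    else if pvRevNat (a * (b + 1)) = a * (b + 1) then pvInnerN a b (a * (b + 1))
    else pvInnerN a b L

def pvOuterN : Nat → Nat → Nat
  | 0, L => L
  | f + 1, L => pvOuterN f (pvInnerN (f + 1) (f + 1) L)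

/- Nat mirrors of B's palindrome generator. -/
def pvPalC (l half : Nat) : Nat :=
  if l % 2 ≠ 0 then half * 10 ^ ((l + 1) / 2 - 1) + pvRevNat (half / 10)
  else half * 10 ^ ((l + 1) / 2) + pvRevNat half

def pvFront (l half : Nat) : List Nat :=
  if l % 2 ≠ 0 then (Nat.digits 10 half).tail.reverse else (Nat.digits 10 half).reverse

def pvBaseN (l : Nat) : Nat :=
  if l % 2 ≠ 0 then 10 ^ ((l + 1) / 2 - 1) else 10 ^ ((l + 1) / 2)

def pvStart (n l : Nat) : Nat := min (10 ^ ((l + 1) / 2) - 1) (n / pvBaseN l)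

def pvHalves (h s : Nat) : List Nat :=
  (List.range (s + 1 - 10 ^ (h - 1))).map (fun k => s - k)

def pvBlock (n l : Nat) : List Nat :=
  (pvHalves ((l + 1) / 2) (pvStart n l)).filterMap
    (fun half => if pvPalC l half ≤ n then some (pvPalC l half) else none)

def pvD (n : Nat) : Nat := (Nat.digits 10 n).length

def pvEN (n : Nat) : List Nat :=
  ((List.range (pvD n)).map (fun k => pvD n - k)).flatMap (pvBlock n)

/- ---- digit-reversal loops compute pvRevNat ---- -/

theorem pvRevLoopA_eq (n acc : Nat) :
    pvRevLoopA (n : Int) (acc : Int) =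
      ((pvRevNat n + acc * 10 ^ (Nat.digits 10 n).length : Nat) : Int) := by
  induction n using Nat.strong_induction_on generalizing acc with
  | _ n IH =>
  rw [pvRevLoopA]
  by_cases hn : n = 0
  · subst hn
    simp [pvRevNat]
  · have hpos : 0 < n := Nat.pos_of_ne_zero hn
    have hlt : (0 : Int) < (n : Int) := by exact_mod_cast hpos
    rw [dif_pos hlt]
    have h10 : (10 : Int) = ((10 : Nat) : Int) := rfl
    rw [h10, PySem.Int.floordiv_natCast, PySem.Int.mod_natCast]
    have hacc : (acc : Int) * ((10 : Nat) : Int) + ((n % 10 : Nat) : Int) =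
        ((acc * 10 + n % 10 : Nat) : Int) := by push_cast; ring
    rw [hacc, IH (n / 10) (Nat.div_lt_self hpos (by norm_num))]
    have hdig : Nat.digits 10 n = n % 10 :: Nat.digits 10 (n / 10) :=
      Nat.digits_def' (by norm_num) hpos
    have : pvRevNat n = pvRevNat (n / 10) + 10 ^ (Nat.digits 10 (n / 10)).length * (n % 10) := by
      simp [pvRevNat, hdig, Nat.ofDigits_append, Nat.ofDigits]
    push_cast
    rw [this, hdig]
    push_cast [List.length_cons]
    ring

theorem pvRevB_eq (n acc : Nat) :
    pvRevB (n : Int) (acc : Int) =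
      ((pvRevNat n + acc * 10 ^ (Nat.digits 10 n).length : Nat) : Int) := by
  induction n using Nat.strong_induction_on generalizing acc with
  | _ n IH =>
  rw [pvRevB]
  by_cases hn : n = 0
  · subst hn
    simp [pvRevNat]
  · have hpos : 0 < n := Nat.pos_of_ne_zero hn
    have hlt : (0 : Int) < (n : Int) := by exact_mod_cast hpos
    rw [dif_pos hlt]
    have h10 : (10 : Int) = ((10 : Nat) : Int) := rfl
    rw [h10, PySem.Int.floordiv_natCast, PySem.Int.mod_natCast]
    have hacc : (acc : Int) * ((10 : Nat) : Int) + ((n % 10 : Nat) : Int) =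
        ((acc * 10 + n % 10 : Nat) : Int) := by push_cast; ring
    rw [hacc, IH (n / 10) (Nat.div_lt_self hpos (by norm_num))]
    have hdig : Nat.digits 10 n = n % 10 :: Nat.digits 10 (n / 10) :=
      Nat.digits_def' (by norm_num) hpos
    have : pvRevNat n = pvRevNat (n / 10) + 10 ^ (Nat.digits 10 (n / 10)).length * (n % 10) := by
      simp [pvRevNat, hdig, Nat.ofDigits_append, Nat.ofDigits]
    push_cast
    rw [this, hdig]
    push_cast [List.length_cons]
    ring

theorem pvIsPalindrome_iff (a b : Nat) :
    pvIsPalindrome (a : Int) (b : Int) = true ↔ pvPal (a * b) := by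
  have h : ((a : Int) * (b : Int)) = ((a * b : Nat) : Int) := by push_cast; ring
  unfold pvIsPalindrome pvReverse
  rw [h, show (0 : Int) = ((0 : Nat) : Int) from rfl, pvRevLoopA_eq]
  simp [pvPal]
  rw [h]
  exact Nat.cast_inj

/- ---- A's loops equal the Nat mirrors ---- -/

theorem pvInnerA_cast (a b L : Nat) :
    pvInnerA (a : Int) (b : Int) (L : Int) = ((pvInnerN a b L : Nat) : Int) := by
  induction b generalizing L with
  | zero =>
    rw [pvInnerA]
    norm_num [pvInnerN]
  | succ b IH =>
    rw [pvInnerA]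
    have hpos : (0 : Int) < ((b + 1 : Nat) : Int) := by exact_mod_cast Nat.succ_pos b
    rw [dif_pos hpos]
    have hprod : (a : Int) * ((b + 1 : Nat) : Int) = ((a * (b + 1) : Nat) : Int) := by
      push_cast; ring
    have hsub : ((b + 1 : Nat) : Int) - 1 = (b : Int) := by push_cast; ring
    by_cases h1 : a * (b + 1) ≤ L
    · rw [if_pos (by rw [hprod]; exact_mod_cast h1)]
      simp [pvInnerN, h1]
    · rw [if_neg (by rw [hprod]; exact_mod_cast h1)]
      by_cases h2 : pvPal (a * (b + 1))
      · rw [if_pos ((pvIsPalindrome_iff a (b + 1)).2 h2), hsub, hprod, IH]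
        simp only [pvInnerN, if_neg h1, if_pos (show pvRevNat (a * (b + 1)) = a * (b + 1) from h2)]
      · rw [if_neg (fun hh => h2 ((pvIsPalindrome_iff a (b + 1)).1 hh)), hsub, IH]
        simp only [pvInnerN, if_neg h1,
          if_neg (show ¬pvRevNat (a * (b + 1)) = a * (b + 1) from h2)]

theorem pvOuterA_cast (f L : Nat) :
    pvOuterA (f : Int) (L : Int) = ((pvOuterN f L : Nat) : Int) := by
  induction f generalizing L with
  | zero =>
    rw [pvOuterA]
    norm_num [pvOuterN]
  | succ f IH =>
    rw [pvOuterA]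
    have hpos : (0 : Int) < ((f + 1 : Nat) : Int) := by exact_mod_cast Nat.succ_pos f
    have hsub : ((f + 1 : Nat) : Int) - 1 = (f : Int) := by push_cast; ring
    rw [dif_pos hpos, pvInnerA_cast, hsub, IH]
    simp only [pvOuterN]

/- ---- characterisation of A: pvOuterN f 0 is the greatest palindromic product ---- -/

theorem pvInnerN_ge (a b L : Nat) : L ≤ pvInnerN a b L := by
  induction b generalizing L with
  | zero => simp [pvInnerN]
  | succ b IH =>
    simp only [pvInnerN]
    split_ifs with h1 h2
    · exact le_refl L
    · exact le_trans (le_of_lt (Nat.lt_of_not_le h1)) (IH (a * (b + 1)))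
    · exact IH L

theorem pvInnerN_ub (a b L c : Nat) (h1 : 1 ≤ c) (h2 : c ≤ b) (hp : pvPal (a * c)) :
    a * c ≤ pvInnerN a b L := by
  revert h2
  induction b generalizing L with
  | zero => omega
  | succ b IH =>
    intro h2
    simp only [pvInnerN]
    split_ifs with hb hpal
    · exact le_trans (Nat.mul_le_mul_left a h2) hb
    · by_cases hc : c = b + 1
      · subst hc
        exact pvInnerN_ge a b _
      · exact IH (a * (b + 1)) (by omega)
    · by_cases hc : c = b + 1
      · exact absurd (hc ▸ hp) hpal
      · exact IH L (by omega)

theorem pvInnerN_mem' (a b L : Nat) :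
    pvInnerN a b L = L ∨ ∃ c, 1 ≤ c ∧ c ≤ b ∧ pvPal (a * c) ∧ pvInnerN a b L = a * c := by
  induction b generalizing L with
  | zero => exact Or.inl rfl
  | succ b IH =>
    simp only [pvInnerN]
    split_ifs with hb hpal
    · exact Or.inl rfl
    · rcases IH (a * (b + 1)) with h | ⟨c, hc1, hc2, hc3, hc4⟩
      · exact Or.inr ⟨b + 1, by omega, le_refl _, hpal, h⟩
      · exact Or.inr ⟨c, hc1, by omega, hc3, hc4⟩
    · rcases IH L with h | ⟨c, hc1, hc2, hc3, hc4⟩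
      · exact Or.inl h
      · exact Or.inr ⟨c, hc1, by omega, hc3, hc4⟩

theorem pvOuterN_ge (f L : Nat) : L ≤ pvOuterN f L := by
  induction f generalizing L with
  | zero => simp [pvOuterN]
  | succ f IH =>
    simp only [pvOuterN]
    exact le_trans (pvInnerN_ge (f + 1) (f + 1) L) (IH _)

theorem pvOuterN_ub (f L p : Nat) (hp : pvPal p) (hf : pvFact f p) : p ≤ pvOuterN f L := by
  obtain ⟨a, b, hb1, hba, haf, heq⟩ := hf
  subst heq
  revert haf
  induction f generalizing L with
  | zero => omega
  | succ f IH =>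
    intro haf
    simp only [pvOuterN]
    by_cases ha : a = f + 1
    · subst ha
      exact le_trans (pvInnerN_ub _ _ L b hb1 hba hp) (pvOuterN_ge f _)
    · exact IH _ (by omega)

theorem pvOuterN_mem (f L : Nat) :
    pvOuterN f L = L ∨ ∃ p, pvPal p ∧ pvFact f p ∧ pvOuterN f L = p := by
  induction f generalizing L with
  | zero => exact Or.inl rfl
  | succ f IH =>
    simp only [pvOuterN]
    rcases IH (pvInnerN (f + 1) (f + 1) L) with h | ⟨p, hp1, ⟨a, b, hb1, hba, haf, heq⟩, hp3⟩
    · rcases pvInnerN_mem' (f + 1) (f + 1) L with h2 | ⟨c, hc1, hc2, hc3, hc4⟩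
      · exact Or.inl (h.trans h2)
      · exact Or.inr ⟨(f + 1) * c, hc3, ⟨f + 1, c, hc1, hc2, le_refl _, rfl⟩, h.trans hc4⟩
    · exact Or.inr ⟨p, hp1, ⟨a, b, hb1, hba, by omega, heq⟩, hp3⟩

/- ---- B's factor-pair test ---- -/

theorem pvHfLoop_iff (p : Nat) (hp : 1 ≤ p) :
    ∀ (fuel a : Nat), a < fuel →
      (pvHfLoop (p : Int) fuel (a : Int) = true ↔
        ∃ d : Nat, 1 ≤ d ∧ d ≤ a ∧ p ≤ d * d ∧ p % d = 0) := by
  intro fuel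
  induction fuel with
  | zero => omega
  | succ fuel IH =>
    intro a ha
    simp only [pvHfLoop]
    by_cases h1 : p ≤ a * a
    · have ha1 : 1 ≤ a := by
        rcases Nat.eq_zero_or_pos a with h | h
        · subst h; omega
        · exact h
      have h1' : (p : Int) ≤ (a : Int) * (a : Int) := by exact_mod_cast h1
      rw [if_pos h1']
      have hmod : PySem.Int.mod (p : Int) (a : Int) = ((p % a : Nat) : Int) :=
        PySem.Int.mod_natCast p a
      by_cases h2 : p % a = 0
      · rw [hmod]
        simp only [h2, Nat.cast_zero, BEq.rfl, if_true, true_iff]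
        exact ⟨a, ha1, le_refl a, h1, h2⟩
      · have : (((p % a : Nat) : Int) == 0) = false := by
          simp only [beq_eq_false_iff_ne, ne_eq, Nat.cast_eq_zero]
          exact h2
        rw [hmod, this]
        simp only [Bool.false_eq_true, if_false]
        have hsub : (a : Int) - 1 = ((a - 1 : Nat) : Int) := by
          have := ha1; push_cast [Nat.cast_sub this]; ring
        rw [hsub, IH (a - 1) (by omega)]
        constructor
        · rintro ⟨d, hd1, hd2, hd3, hd4⟩
          exact ⟨d, hd1, by omega, hd3, hd4⟩
        · rintro ⟨d, hd1, hd2, hd3, hd4⟩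
          refine ⟨d, hd1, ?_, hd3, hd4⟩
          rcases Nat.lt_or_ge d a with h | h
          · omega
          · have : d = a := by omega
            exact absurd (this ▸ hd4) h2
    · rw [if_neg (by exact_mod_cast h1)]
      simp only [Bool.false_eq_true, false_iff]
      rintro ⟨d, hd1, hd2, hd3, hd4⟩
      exact h1 (le_trans hd3 (Nat.mul_le_mul hd2 hd2))

theorem pvHasFactorPair_iff (p lim : Nat) (hp : 1 ≤ p) :
    pvHasFactorPair (p : Int) (lim : Int) = true ↔ pvFact lim p := by
  unfold pvHasFactorPair
  have htn : ((lim : Int)).toNat = lim := Int.toNat_natCast lim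
  rw [htn, pvHfLoop_iff p hp (lim + 1) lim (by omega)]
  constructor
  · rintro ⟨d, hd1, hd2, hd3, hd4⟩
    have hdvd : d ∣ p := Nat.dvd_of_mod_eq_zero hd4
    refine ⟨d, p / d, ?_, ?_, hd2, Nat.mul_div_cancel' hdvd⟩
    · exact Nat.div_pos (Nat.le_of_dvd (by omega) hdvd) (by omega)
    · have hmul : d * (p / d) = p := Nat.mul_div_cancel' hdvd
      exact Nat.le_of_mul_le_mul_left (by rw [hmul]; exact hd3) (by omega)
  · rintro ⟨a, b, hb1, hba, halim, heq⟩
    have ha1 : 1 ≤ a := le_trans hb1 hba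
    refine ⟨a, ha1, halim, ?_, ?_⟩
    · calc p = a * b := heq.symm
        _ ≤ a * a := Nat.mul_le_mul_left a hba
    · have : a ∣ p := ⟨b, heq.symm⟩
      omega

/- ---- digit machinery for the palindrome generator ---- -/

theorem pvRevNat_lt_pow (n : Nat) : pvRevNat n < 10 ^ (Nat.digits 10 n).length := by
  have := Nat.ofDigits_lt_base_pow_length (b := 10) (l := (Nat.digits 10 n).reverse)
    (by norm_num) (fun x hx => Nat.digits_lt_base (by norm_num) (List.mem_reverse.1 hx))
  rwa [List.length_reverse] at this

theorem pvDigitsLen_of_range (h half : Nat) (hh : 1 ≤ h) (h1 : 10 ^ (h - 1) ≤ half)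
    (h2 : half < 10 ^ h) : (Nat.digits 10 half).length = h := by
  have hub : (Nat.digits 10 half).length ≤ h := (Nat.digits_length_le_iff (by norm_num) half).2 h2
  have hlb : h - 1 < (Nat.digits 10 half).length :=
    (Nat.lt_digits_length_iff (by norm_num) half).2 h1
  omega

theorem pvFront_len (l half : Nat) (hl : 1 ≤ l)
    (hlen : (Nat.digits 10 half).length = (l + 1) / 2) :
    (pvFront l half).length = l - (l + 1) / 2 := by
  unfold pvFront
  rcases Nat.mod_two_eq_zero_or_one l with hpar | hpar <;>
    simp [hpar, List.length_tail, hlen] <;> omega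

theorem pvPalC_ofDigits (l half : Nat) (hl : 1 ≤ l) (hhalf : 1 ≤ half)
    (hlen : (Nat.digits 10 half).length = (l + 1) / 2) :
    pvPalC l half = Nat.ofDigits 10 (pvFront l half ++ Nat.digits 10 half) := by
  have hdig : Nat.digits 10 half = half % 10 :: Nat.digits 10 (half / 10) :=
    Nat.digits_def' (by norm_num) (by omega)
  have h2 : Nat.digits 10 (half / 10) = (Nat.digits 10 half).tail := by simp [hdig]
  rw [Nat.ofDigits_append, pvFront_len l half hl hlen, Nat.ofDigits_digits]
  unfold pvPalC pvFront
  rcases Nat.mod_two_eq_zero_or_one l with hpar | hpar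
  · rw [if_neg (by omega), if_neg (by omega)]
    have h3 : l - (l + 1) / 2 = (l + 1) / 2 := by omega
    rw [h3]
    unfold pvRevNat
    ring
  · rw [if_pos (by omega), if_pos (by omega)]
    have h3 : l - (l + 1) / 2 = (l + 1) / 2 - 1 := by omega
    rw [h3]
    unfold pvRevNat
    rw [h2]
    ring

theorem pvFront_append_rev (l half : Nat) (hhalf : 1 ≤ half) :
    (pvFront l half ++ Nat.digits 10 half).reverse = pvFront l half ++ Nat.digits 10 half := by
  have hdig : Nat.digits 10 half = half % 10 :: Nat.digits 10 (half / 10) :=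
    Nat.digits_def' (by norm_num) (by omega)
  unfold pvFront
  rcases Nat.mod_two_eq_zero_or_one l with hpar | hpar
  · simp [hpar, List.reverse_append]
  · rw [if_pos (by omega), hdig]
    simp [List.reverse_append, List.append_assoc]

theorem pvPalC_digits (l half : Nat) (hl : 1 ≤ l) (hhalf : 1 ≤ half)
    (hlen : (Nat.digits 10 half).length = (l + 1) / 2) :
    Nat.digits 10 (pvPalC l half) = pvFront l half ++ Nat.digits 10 half := by
  rw [pvPalC_ofDigits l half hl hhalf hlen]
  have hne : Nat.digits 10 half ≠ [] := Nat.digits_ne_nil_iff_ne_zero.2 (by omega)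
  refine Nat.digits_ofDigits 10 (by norm_num) _ ?_ ?_
  · intro d hd
    rcases List.mem_append.1 hd with hd | hd
    · unfold pvFront at hd
      rcases Nat.mod_two_eq_zero_or_one l with hpar | hpar
      · rw [if_neg (by simp [hpar])] at hd
        exact Nat.digits_lt_base (by norm_num) (List.mem_reverse.1 hd)
      · rw [if_pos (by simp [hpar])] at hd
        exact Nat.digits_lt_base (by norm_num)
          (List.mem_of_mem_tail (List.mem_reverse.1 hd))
    · exact Nat.digits_lt_base (by norm_num) hd
  · intro hne2
    rw [List.getLast_append_of_right_ne_nil _ _ hne]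
    exact Nat.getLast_digit_ne_zero 10 (by omega)

theorem pvPalC_len (l half : Nat) (hl : 1 ≤ l) (hhalf : 1 ≤ half)
    (hlen : (Nat.digits 10 half).length = (l + 1) / 2) :
    (Nat.digits 10 (pvPalC l half)).length = l := by
  rw [pvPalC_digits l half hl hhalf hlen, List.length_append,
    pvFront_len l half hl hlen, hlen]
  omega

theorem pvPalC_pal (l half : Nat) (hl : 1 ≤ l) (hhalf : 1 ≤ half)
    (hlen : (Nat.digits 10 half).length = (l + 1) / 2) : pvPal (pvPalC l half) := by
  unfold pvPal pvRevNat
  rw [pvPalC_digits l half hl hhalf hlen, pvFront_append_rev l half hhalf,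
    ← pvPalC_ofDigits l half hl hhalf hlen]

theorem pvPal_mod10 (p : Nat) (hp : 1 ≤ p) (h : pvPal p) : p % 10 ≠ 0 := by
  intro h0
  have hdig : Nat.digits 10 p = p % 10 :: Nat.digits 10 (p / 10) :=
    Nat.digits_def' (by norm_num) (by omega)
  rw [h0] at hdig
  have hrev : pvRevNat p = Nat.ofDigits 10 (Nat.digits 10 (p / 10)).reverse := by
    unfold pvRevNat
    rw [hdig]
    simp [List.reverse_cons, Nat.ofDigits_append, Nat.ofDigits]
  have hlt : pvRevNat p < 10 ^ (Nat.digits 10 (p / 10)).length := by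
    rw [hrev]
    have := Nat.ofDigits_lt_base_pow_length (b := 10) (l := (Nat.digits 10 (p / 10)).reverse)
      (by norm_num) (fun x hx => Nat.digits_lt_base (by norm_num) (List.mem_reverse.1 hx))
    rwa [List.length_reverse] at this
  have hge : 10 ^ (Nat.digits 10 (p / 10)).length ≤ p := by
    refine (Nat.lt_digits_length_iff (by norm_num) p).1 ?_
    rw [hdig]
    simp
  rw [h] at hlt
  omega

theorem pvPal_digits_rev (p : Nat) (hp : 1 ≤ p) (h : pvPal p) :
    (Nat.digits 10 p).reverse = Nat.digits 10 p := by
  have hm : p % 10 ≠ 0 := pvPal_mod10 p hp h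
  have hne : Nat.digits 10 p ≠ [] := Nat.digits_ne_nil_iff_ne_zero.2 (by omega)
  have hdr : Nat.digits 10 (pvRevNat p) = (Nat.digits 10 p).reverse := by
    refine Nat.digits_ofDigits 10 (by norm_num) _ ?_ ?_
    · intro d hd
      exact Nat.digits_lt_base (by norm_num) (List.mem_reverse.1 hd)
    · intro hne2
      have hdig : Nat.digits 10 p = p % 10 :: Nat.digits 10 (p / 10) :=
        Nat.digits_def' (by norm_num) (by omega)
      have h1 : (Nat.digits 10 p).reverse.getLast? = some (p % 10) := by
        rw [List.getLast?_reverse, hdig]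
        rfl
      rw [List.getLast?_eq_some_getLast hne2] at h1
      intro h0
      rw [h0] at h1
      exact hm (Option.some.inj h1).symm
  rw [h] at hdr
  exact hdr.symm

theorem pvPal_decomp (p : Nat) (hp : 1 ≤ p) (h : pvPal p) :
    ∃ half, 10 ^ ((pvD p + 1) / 2 - 1) ≤ half ∧ half < 10 ^ ((pvD p + 1) / 2) ∧
      pvPalC (pvD p) half = p := by
  have hrev : (Nat.digits 10 p).reverse = Nat.digits 10 p := pvPal_digits_rev p hp h
  have hne : Nat.digits 10 p ≠ [] := Nat.digits_ne_nil_iff_ne_zero.2 (by omega)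
  have hl1 : 1 ≤ pvD p := List.length_pos_of_ne_nil hne
  set es := Nat.digits 10 p with hes
  set l := pvD p with hldef
  set hh := (l + 1) / 2 with hhdef
  have hhl : 1 ≤ hh := by omega
  have hlenes : es.length = l := rfl
  have hdropne : es.drop (l - hh) ≠ [] := by
    intro hnil
    have := congrArg List.length hnil
    simp [hlenes] at this
    omega
  set half := Nat.ofDigits 10 (es.drop (l - hh)) with hhalfdef
  have hdighalf : Nat.digits 10 half = es.drop (l - hh) := by
    refine Nat.digits_ofDigits 10 (by norm_num) _ ?_ ?_
    · intro d hd
      exact Nat.digits_lt_base (by norm_num) (List.mem_of_mem_drop hd)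
    · intro hne2
      rw [List.getLast_drop hne2]
      exact Nat.getLast_digit_ne_zero 10 (by omega)
  have hlenhalf : (Nat.digits 10 half).length = hh := by
    rw [hdighalf, List.length_drop, hlenes]
    omega
  have hhalf1 : 1 ≤ half := by
    by_contra h0
    have hz : half = 0 := by omega
    rw [hz] at hdighalf
    have hnil : es.drop (l - hh) = [] := by
      rw [← hdighalf]
      simp
    exact hdropne hnil
  have hub : half < 10 ^ hh := by
    have := (Nat.digits_length_le_iff (b := 10) (by norm_num) half).1 (le_of_eq hlenhalf)
    exact this
  have hlb : 10 ^ (hh - 1) ≤ half := by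
    refine (Nat.lt_digits_length_iff (by norm_num) half).1 ?_
    rw [hlenhalf]
    omega
  refine ⟨half, hlb, hub, ?_⟩
  have hfront : pvFront l half = es.take (l - hh) := by
    unfold pvFront
    rcases Nat.mod_two_eq_zero_or_one l with hpar | hpar
    · rw [if_neg (by omega), hdighalf]
      have h1 : l - hh = hh := by omega
      have h2 : es.take (l - hh) = es.reverse.take (l - hh) := by rw [hrev]
      rw [h2, List.take_reverse, hlenes]
      rw [h1, show l - hh = hh from h1]
    · rw [if_pos (by omega), hdighalf, List.tail_drop]
      have h1 : l - hh + 1 = hh := by omega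
      have h2 : es.take (l - hh) = es.reverse.take (l - hh) := by rw [hrev]
      rw [h2, List.take_reverse, hlenes, h1]
      rw [show l - (l - hh) = hh from by omega]
  have : pvPalC l half = Nat.ofDigits 10 (pvFront l half ++ Nat.digits 10 half) :=
    pvPalC_ofDigits l half hl1 hhalf1 hlenhalf
  rw [this, hfront, hdighalf, List.take_append_drop]
  exact Nat.ofDigits_digits 10 p

/- ---- the generated list: sound, complete, strictly descending ---- -/

theorem pvMem_halves (h s x : Nat) :
    x ∈ pvHalves h s ↔ 10 ^ (h - 1) ≤ x ∧ x ≤ s := by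
  unfold pvHalves
  constructor
  · rintro hmem
    rcases List.mem_map.1 hmem with ⟨k, hk, rfl⟩
    rw [List.mem_range] at hk
    omega
  · rintro ⟨h1, h2⟩
    refine List.mem_map.2 ⟨s - x, ?_, by omega⟩
    rw [List.mem_range]
    omega

theorem pvPalC_ge_base (l half : Nat) : half * pvBaseN l ≤ pvPalC l half := by
  unfold pvPalC pvBaseN
  rcases Nat.mod_two_eq_zero_or_one l with hpar | hpar
  · rw [if_neg (by omega), if_neg (by omega)]
    exact Nat.le_add_right _ _
  · rw [if_pos (by omega), if_pos (by omega)]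
    exact Nat.le_add_right _ _

theorem pvPalC_lt (l x y : Nat) (hl : 1 ≤ l) (hx : x < 10 ^ ((l + 1) / 2))
    (hyx : y < x) : pvPalC l y < pvPalC l x := by
  have hh1 : 1 ≤ (l + 1) / 2 := by omega
  have hy : y < 10 ^ ((l + 1) / 2) := lt_trans hyx hx
  unfold pvPalC
  rcases Nat.mod_two_eq_zero_or_one l with hpar | hpar
  · rw [if_neg (by omega), if_neg (by omega)]
    have hr : pvRevNat y < 10 ^ ((l + 1) / 2) := by
      calc pvRevNat y < 10 ^ (Nat.digits 10 y).length := pvRevNat_lt_pow y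
        _ ≤ 10 ^ ((l + 1) / 2) := Nat.pow_le_pow_right (by norm_num)
            ((Nat.digits_length_le_iff (by norm_num) y).2 hy)
    calc y * 10 ^ ((l + 1) / 2) + pvRevNat y < (y + 1) * 10 ^ ((l + 1) / 2) := by
          rw [Nat.add_mul, Nat.one_mul]
          omega
      _ ≤ x * 10 ^ ((l + 1) / 2) := Nat.mul_le_mul_right _ (by omega)
      _ ≤ x * 10 ^ ((l + 1) / 2) + pvRevNat x := Nat.le_add_right _ _
  · rw [if_pos (by omega), if_pos (by omega)]
    have hdiv : y / 10 < 10 ^ ((l + 1) / 2 - 1) := by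
      have h10 : 10 ^ ((l + 1) / 2) = 10 ^ ((l + 1) / 2 - 1) * 10 := by
        rw [← Nat.pow_succ]
        congr 1
        omega
      rw [Nat.div_lt_iff_lt_mul (by norm_num)]
      omega
    have hr : pvRevNat (y / 10) < 10 ^ ((l + 1) / 2 - 1) := by
      calc pvRevNat (y / 10) < 10 ^ (Nat.digits 10 (y / 10)).length := pvRevNat_lt_pow _
        _ ≤ 10 ^ ((l + 1) / 2 - 1) := Nat.pow_le_pow_right (by norm_num)
            ((Nat.digits_length_le_iff (by norm_num) _).2 hdiv)
    calc y * 10 ^ ((l + 1) / 2 - 1) + pvRevNat (y / 10)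
        < (y + 1) * 10 ^ ((l + 1) / 2 - 1) := by
          rw [Nat.add_mul, Nat.one_mul]
          omega
      _ ≤ x * 10 ^ ((l + 1) / 2 - 1) := Nat.mul_le_mul_right _ (by omega)
      _ ≤ x * 10 ^ ((l + 1) / 2 - 1) + pvRevNat (x / 10) := Nat.le_add_right _ _

theorem pvBlock_sound (n l p : Nat) (hl : 1 ≤ l) (hmem : p ∈ pvBlock n l) :
    10 ^ (l - 1) ≤ p ∧ p < 10 ^ l ∧ p ≤ n ∧ pvPal p := by
  unfold pvBlock at hmem
  rcases List.mem_filterMap.1 hmem with ⟨half, hhm, hsome⟩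
  have hh1 : 1 ≤ (l + 1) / 2 := by omega
  rcases (pvMem_halves _ _ half).1 hhm with ⟨hlb, hs⟩
  have hub : half < 10 ^ ((l + 1) / 2) := by
    have := le_trans hs (Nat.min_le_left _ _)
    have hpos : 0 < 10 ^ ((l + 1) / 2) := Nat.pow_pos (by norm_num)
    omega
  have hhalf1 : 1 ≤ half := le_trans (Nat.pow_pos (by norm_num)) hlb
  have hlen : (Nat.digits 10 half).length = (l + 1) / 2 :=
    pvDigitsLen_of_range _ half hh1 hlb hub
  by_cases hle : pvPalC l half ≤ n
  · rw [if_pos hle] at hsome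
    have hpe : pvPalC l half = p := Option.some.inj hsome
    subst hpe
    have hplen : (Nat.digits 10 (pvPalC l half)).length = l := pvPalC_len l half hl hhalf1 hlen
    refine ⟨?_, ?_, hle, pvPalC_pal l half hl hhalf1 hlen⟩
    · refine (Nat.lt_digits_length_iff (by norm_num) _).1 ?_
      rw [hplen]
      omega
    · refine (Nat.digits_length_le_iff (by norm_num) _).1 (le_of_eq hplen)
  · rw [if_neg hle] at hsome
    exact absurd hsome (by simp)

theorem pvBlock_complete (n p : Nat) (hp : 1 ≤ p) (hn : p ≤ n) (h : pvPal p) :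
    p ∈ pvBlock n (pvD p) := by
  obtain ⟨half, hlb, hub, hpe⟩ := pvPal_decomp p hp h
  have hh1 : 1 ≤ (pvD p + 1) / 2 := by
    have : 1 ≤ pvD p := by
      unfold pvD
      have hne : Nat.digits 10 p ≠ [] := Nat.digits_ne_nil_iff_ne_zero.2 (by omega)
      exact List.length_pos_of_ne_nil hne
    omega
  have hbase : 0 < pvBaseN (pvD p) := by
    unfold pvBaseN
    split_ifs <;> exact Nat.pow_pos (by norm_num)
  have hs : half ≤ pvStart n (pvD p) := by
    refine le_min (by omega) ?_
    rw [Nat.le_div_iff_mul_le hbase]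
    calc half * pvBaseN (pvD p) ≤ pvPalC (pvD p) half := pvPalC_ge_base _ _
      _ = p := hpe
      _ ≤ n := hn
  unfold pvBlock
  refine List.mem_filterMap.2 ⟨half, (pvMem_halves _ _ half).2 ⟨hlb, hs⟩, ?_⟩
  rw [hpe, if_pos hn]

theorem pvFilterMapIf_sublist {α β : Type} (l : List α) (c : α → Prop) [DecidablePred c]
    (g : α → β) :
    (l.filterMap (fun x => if c x then some (g x) else none)).Sublist (l.map g) := by
  induction l with
  | nil => simp
  | cons x xs IH =>
    rw [List.filterMap_cons, List.map_cons]
    by_cases hc : c x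
    · rw [if_pos hc]
      exact IH.cons₂ _
    · rw [if_neg hc]
      exact IH.cons _

theorem pvBlock_sorted (n l : Nat) (hl : 1 ≤ l) : (pvBlock n l).Pairwise (· > ·) := by
  have hsub : pvStart n l ≤ 10 ^ ((l + 1) / 2) - 1 := Nat.min_le_left _ _
  have hmap : ((pvHalves ((l + 1) / 2) (pvStart n l)).map (pvPalC l)).Pairwise (· > ·) := by
    unfold pvHalves
    rw [List.map_map]
    rw [List.pairwise_iff_getElem]
    intro i j hi hj hij
    simp only [List.length_map, List.length_range] at hi hj
    simp only [List.getElem_map, List.getElem_range, Function.comp]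
    have hpos : 0 < 10 ^ (((l + 1) / 2) - 1) := Nat.pow_pos (by norm_num)
    have he : 10 ^ ((l + 1) / 2) = 10 ^ (((l + 1) / 2) - 1) * 10 := by
      rw [← Nat.pow_succ]
      congr 1
      omega
    exact pvPalC_lt l _ _ hl (by omega) (by omega)
  exact List.Pairwise.sublist (pvFilterMapIf_sublist _ _ _) hmap

theorem pvPairwise_flatMap {α : Type} (l : List α) (f : α → List Nat)
    (h1 : ∀ a ∈ l, (f a).Pairwise (· > ·))
    (h2 : l.Pairwise (fun a b => ∀ x ∈ f a, ∀ y ∈ f b, x > y)) :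
    (l.flatMap f).Pairwise (· > ·) := by
  induction l with
  | nil => simp
  | cons a xs IH =>
    rw [List.flatMap_cons, List.pairwise_append]
    rcases List.pairwise_cons.1 h2 with ⟨ha, htail⟩
    refine ⟨h1 a (List.mem_cons_self), IH (fun b hb => h1 b (List.mem_cons_of_mem a hb)) htail, ?_⟩
    intro x hx y hy
    rcases List.mem_flatMap.1 hy with ⟨b, hb, hyb⟩
    exact ha b hb x hx y hyb

theorem pvEN_sound (n p : Nat) (hmem : p ∈ pvEN n) : 1 ≤ p ∧ p ≤ n ∧ pvPal p := by
  unfold pvEN at hmem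
  rcases List.mem_flatMap.1 hmem with ⟨l, hlm, hpm⟩
  rcases List.mem_map.1 hlm with ⟨k, hk, rfl⟩
  rw [List.mem_range] at hk
  have hl1 : 1 ≤ pvD n - k := by omega
  obtain ⟨hlb, hub, hle, hpal⟩ := pvBlock_sound n _ p hl1 hpm
  exact ⟨le_trans (Nat.pow_pos (by norm_num)) hlb, hle, hpal⟩

theorem pvEN_complete (n p : Nat) (hp : 1 ≤ p) (hn : p ≤ n) (h : pvPal p) : p ∈ pvEN n := by
  have hDp1 : 1 ≤ pvD p := by
    unfold pvD
    exact List.length_pos_of_ne_nil (Nat.digits_ne_nil_iff_ne_zero.2 (by omega))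
  have hDle : pvD p ≤ pvD n := by
    refine (Nat.digits_length_le_iff (by norm_num) p).2 ?_
    calc p ≤ n := hn
      _ < 10 ^ pvD n := Nat.lt_base_pow_length_digits (by norm_num)
  unfold pvEN
  refine List.mem_flatMap.2 ⟨pvD p, ?_, pvBlock_complete n p hp hn h⟩
  refine List.mem_map.2 ⟨pvD n - pvD p, ?_, by omega⟩
  rw [List.mem_range]
  omega

theorem pvEN_sorted (n : Nat) : (pvEN n).Pairwise (· > ·) := by
  unfold pvEN
  refine pvPairwise_flatMap _ _ ?_ ?_
  · intro l hl
    rcases List.mem_map.1 hl with ⟨k, hk, rfl⟩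
    rw [List.mem_range] at hk
    exact pvBlock_sorted n _ (by omega)
  · rw [List.pairwise_iff_getElem]
    intro i j hi hj hij
    simp only [List.length_map, List.length_range] at hi hj
    simp only [List.getElem_map, List.getElem_range]
    intro x hx y hy
    have hli : 1 ≤ pvD n - i := by omega
    have hlj : 1 ≤ pvD n - j := by omega
    obtain ⟨hxlb, _, _, _⟩ := pvBlock_sound n _ x hli hx
    obtain ⟨_, hyub, _, _⟩ := pvBlock_sound n _ y hlj hy
    have hle : 10 ^ (pvD n - j) ≤ 10 ^ (pvD n - i - 1) :=
      Nat.pow_le_pow_right (by norm_num) (by omega)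
    omega

theorem pvFind_first_ge {Q : Nat → Bool} {l : List Nat} (hs : l.Pairwise (· > ·)) {p q : Nat}
    (hp : p ∈ l) (hQ : Q p = true) (hq : l.find? Q = some q) : p ≤ q := by
  induction l with
  | nil => simp at hq
  | cons x xs IH =>
    rcases List.pairwise_cons.1 hs with ⟨hx, htail⟩
    by_cases hc : Q x = true
    · rw [List.find?_cons_of_pos hc] at hq
      have hxq : x = q := Option.some.inj hq
      rcases List.mem_cons.1 hp with rfl | hpm
      · omega
      · have := hx p hpm
        omega
    · rw [List.find?_cons_of_neg hc] at hq
      rcases List.mem_cons.1 hp with rfl | hpm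
      · exact absurd hQ hc
      · exact IH htail hpm hq

/- ---- bridging B's Int port to the Nat mirror ---- -/

theorem pvNumDigits_cast (n d : Nat) : pvNumDigits (n : Int) (d : Int) = ((pvD n + d : Nat) : Int) := by
  induction n using Nat.strong_induction_on generalizing d with
  | _ n IH =>
  rw [pvNumDigits]
  by_cases hn : n = 0
  · subst hn
    simp [pvD]
  · have hpos : 0 < n := Nat.pos_of_ne_zero hn
    have hlt : (0 : Int) < (n : Int) := by exact_mod_cast hpos
    rw [dif_pos hlt, show (10 : Int) = ((10 : Nat) : Int) from rfl, PySem.Int.floordiv_natCast,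
      show (d : Int) + 1 = ((d + 1 : Nat) : Int) from by push_cast; ring,
      IH (n / 10) (Nat.div_lt_self hpos (by norm_num))]
    have hdig : Nat.digits 10 n = n % 10 :: Nat.digits 10 (n / 10) :=
      Nat.digits_def' (by norm_num) hpos
    unfold pvD
    rw [hdig]
    push_cast [List.length_cons]
    ring

theorem pvPalindromesDesc_cast (n : Nat) :
    pvPalindromesDesc (n : Int) = (pvEN n).map (fun p : Nat => (p : Int)) := by
  unfold pvPalindromesDesc pvEN
  rw [show pvNumDigits (n : Int) 0 = ((pvD n : Nat) : Int) from by
        simpa using pvNumDigits_cast n 0]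
  rw [PySem.List.pyRange_neg_one]
  rw [show (((pvD n : Nat) : Int) - 0).toNat = pvD n from by omega]
  have hr : (((List.range (pvD n)).map (fun k => pvD n - k)).flatMap (pvBlock n)).map
        (fun p : Nat => (p : Int)) =
      (List.range (pvD n)).flatMap (fun k => (pvBlock n (pvD n - k)).map (fun p : Nat => (p : Int))) := by
    rw [List.map_flatMap, List.flatMap_map]
  rw [hr]
  conv_lhs => rw [List.flatMap_map]
  refine List.flatMap_congr ?_
  intro k hk
  rw [List.mem_range] at hk
  have hl1 : 1 ≤ pvD n - k := by omega
  have hcastl : ((pvD n : Nat) : Int) - (k : Int) = ((pvD n - k : Nat) : Int) := by omega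
  rw [hcastl]
  set l' := pvD n - k with hl'def
  have hh : PySem.Int.floordiv ((l' : Int) + 1) 2 = (((l' + 1) / 2 : Nat) : Int) := by
    rw [show ((l' : Int) + 1) = ((l' + 1 : Nat) : Int) from by push_cast; ring,
      show (2 : Int) = ((2 : Nat) : Int) from rfl, PySem.Int.floordiv_natCast]
  rw [hh]
  set hh' := (l' + 1) / 2 with hh'def
  have hh1 : 1 ≤ hh' := by omega
  have ht1 : ((hh' : Nat) : Int).toNat = hh' := Int.toNat_natCast hh'
  have ht2 : (((hh' : Nat) : Int) - 1).toNat = hh' - 1 := by omega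
  dsimp only
  rw [ht1, ht2]
  have hpowcast : ∀ e : Nat, (10 : Int) ^ e = ((10 ^ e : Nat) : Int) := fun e => by push_cast; ring
  rw [hpowcast hh', hpowcast (hh' - 1)]
  have hple : 10 ^ (hh' - 1) ≤ 10 ^ hh' := Nat.pow_le_pow_right (by norm_num) (by omega)
  have hppos : 0 < 10 ^ (hh' - 1) := Nat.pow_pos (by norm_num)
  have hmod : PySem.Int.mod ((l' : Nat) : Int) 2 = ((l' % 2 : Nat) : Int) := by
    rw [show (2 : Int) = ((2 : Nat) : Int) from rfl, PySem.Int.mod_natCast]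
  rw [hmod]
  have hbase_cast : (if ((l' % 2 : Nat) : Int) ≠ 0 then ((10 ^ (hh' - 1) : Nat) : Int)
      else ((10 ^ hh' : Nat) : Int)) = ((pvBaseN l' : Nat) : Int) := by
    unfold pvBaseN
    rw [hh'def.symm]
    rcases Nat.mod_two_eq_zero_or_one l' with hpar | hpar
    · rw [if_neg (by rw [hpar]; simp), if_neg (by omega)]
    · rw [if_pos (by rw [hpar]; simp), if_pos (by omega)]
  rw [hbase_cast]
  have hdivcast : PySem.Int.floordiv ((n : Nat) : Int) ((pvBaseN l' : Nat) : Int) =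
      ((n / pvBaseN l' : Nat) : Int) := PySem.Int.floordiv_natCast n (pvBaseN l')
  rw [hdivcast]
  have hstart_cast : min (((10 ^ hh' : Nat) : Int) - 1) ((n / pvBaseN l' : Nat) : Int) =
      ((pvStart n l' : Nat) : Int) := by
    have h1 : pvStart n l' = min (10 ^ hh' - 1) (n / pvBaseN l') := by
      unfold pvStart
      rw [hh'def]
    rw [h1, Nat.cast_min]
    congr 1
    omega
  rw [hstart_cast]
  have hst_lb : 10 ^ (hh' - 1) - 1 ≤ pvStart n l' := by
    have hnlb : 10 ^ (l' - 1) ≤ n := by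
      have h2 : l' - 1 < (Nat.digits 10 n).length := by
        have h3 : pvD n = (Nat.digits 10 n).length := rfl
        omega
      exact (Nat.lt_digits_length_iff (by norm_num) n).1 h2
    have hbb : pvBaseN l' ∣ 10 ^ (l' - 1) ∧ 10 ^ (l' - 1) / pvBaseN l' = 10 ^ (hh' - 1) := by
      unfold pvBaseN
      rw [hh'def.symm]
      rcases Nat.mod_two_eq_zero_or_one l' with hpar | hpar
      · rw [if_neg (by omega)]
        constructor
        · exact pow_dvd_pow 10 (by omega)
        · rw [Nat.pow_div (by omega) (by norm_num)]
          congr 1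
          omega
      · rw [if_pos (by omega)]
        constructor
        · exact pow_dvd_pow 10 (by omega)
        · rw [Nat.pow_div (by omega) (by norm_num)]
          congr 1
          omega
    have hdd : 10 ^ (hh' - 1) ≤ n / pvBaseN l' := by
      rw [← hbb.2]
      exact Nat.div_le_div_right hnlb
    have hle2 : 10 ^ (hh' - 1) - 1 ≤ 10 ^ hh' - 1 := by omega
    unfold pvStart
    rw [hh'def.symm]
    omega
  set st := pvStart n l' with hstdef
  rw [PySem.List.pyRange_neg_one]
  rw [show (((st : Nat) : Int) - ((((10 ^ (hh' - 1) : Nat) : Int)) - 1)).toNat =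
        st + 1 - 10 ^ (hh' - 1) from by omega]
  rw [List.filterMap_map]
  conv_rhs => rw [pvBlock, pvHalves, hh'def.symm, hstdef.symm]
  rw [List.map_filterMap, List.filterMap_map]
  refine List.filterMap_congr ?_
  intro k2 hk2
  rw [List.mem_range] at hk2
  have hhfcast : ((st : Nat) : Int) - (k2 : Int) = ((st - k2 : Nat) : Int) := by omega
  simp only [Function.comp]
  rw [hhfcast]
  set hf := st - k2 with hfdef
  have hf1 : 1 ≤ hf := by omega
  have hfd : PySem.Int.floordiv ((hf : Nat) : Int) 10 = ((hf / 10 : Nat) : Int) := by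
    rw [show (10 : Int) = ((10 : Nat) : Int) from rfl, PySem.Int.floordiv_natCast]
  have hrevB : ∀ m : Nat, pvRevB ((m : Nat) : Int) 0 = ((pvRevNat m : Nat) : Int) := by
    intro m
    simpa using pvRevB_eq m 0
  have hbody : ((hf : Nat) : Int) * ((pvBaseN l' : Nat) : Int) +
      (if ((l' % 2 : Nat) : Int) ≠ 0 then pvRevB (PySem.Int.floordiv ((hf : Nat) : Int) 10) 0
       else pvRevB ((hf : Nat) : Int) 0) = ((pvPalC l' hf : Nat) : Int) := by
    rw [hfd, hrevB (hf / 10), hrevB hf]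
    unfold pvPalC pvBaseN
    rw [hh'def.symm]
    rcases Nat.mod_two_eq_zero_or_one l' with hpar | hpar
    · rw [if_neg (by rw [hpar]; simp), if_neg (by omega), if_neg (by omega)]
      push_cast
      ring
    · rw [if_pos (by rw [hpar]; simp), if_pos (by omega), if_pos (by omega)]
      push_cast
      ring
  rw [hbody]
  by_cases hle : pvPalC l' hf ≤ n
  · rw [if_pos (by exact_mod_cast hle), if_pos hle]
    rfl
  · rw [if_neg (by exact_mod_cast hle), if_neg hle]
    rfl

/- ---- main assembly ---- -/

theorem pvMain (limit : Int) :
    largest_three_digit_palindromic_refactor limit =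
      largest_three_digit_palindromic_refactor_alt limit := by
  by_cases hneg : limit ≤ 0
  · unfold largest_three_digit_palindromic_refactor largest_three_digit_palindromic_refactor_alt
    rw [pvOuterA, dif_neg (by omega), if_pos hneg]
  · have h0 : 0 ≤ limit := by omega
    obtain ⟨lim, rfl⟩ : ∃ m : Nat, limit = (m : Int) := ⟨limit.toNat, (Int.toNat_of_nonneg h0).symm⟩
    have hlim1 : 1 ≤ lim := by
      by_contra hc
      have hz : lim = 0 := by omega
      subst hz
      simp at hneg
    unfold largest_three_digit_palindromic_refactor largest_three_digit_palindromic_refactor_alt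
    rw [if_neg hneg]
    rw [show (0 : Int) = ((0 : Nat) : Int) from rfl, pvOuterA_cast]
    have hmul : (lim : Int) * (lim : Int) = ((lim * lim : Nat) : Int) := by push_cast; ring
    rw [hmul, pvPalindromesDesc_cast, List.find?_map]
    set Q : Nat → Bool :=
      (fun p : Int => pvHasFactorPair p ((lim : Nat) : Int)) ∘ (fun p : Nat => (p : Int)) with hQ
    have hQdef : ∀ p : Nat, Q p = pvHasFactorPair ((p : Nat) : Int) ((lim : Nat) : Int) :=
      fun p => rfl
    set M := pvOuterN lim 0 with hMdef
    have hpal1 : pvPal 1 := by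
      unfold pvPal pvRevNat
      rw [Nat.digits_def' (by norm_num : (1 : Nat) < 10) (by norm_num : 0 < 1)]
      norm_num [Nat.ofDigits]
    have hM1 : 1 ≤ M :=
      pvOuterN_ub lim 0 1 hpal1 ⟨1, 1, le_refl 1, le_refl 1, hlim1, by norm_num⟩
    obtain ⟨hpalM, hfactM⟩ : pvPal M ∧ pvFact lim M := by
      rcases pvOuterN_mem lim 0 with h | ⟨p, hp1, hp2, hp3⟩
      · rw [← hMdef] at h
        omega
      · rw [← hMdef] at hp3
        exact hp3 ▸ ⟨hp1, hp2⟩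
    have hMle : M ≤ lim * lim := by
      obtain ⟨a, b, hb1, hba, haf, heq⟩ := hfactM
      calc M = a * b := heq.symm
        _ ≤ lim * lim := Nat.mul_le_mul haf (le_trans hba haf)
    have hQM : Q M = true := by
      rw [hQdef]
      exact (pvHasFactorPair_iff M lim hM1).2 hfactM
    have hMmem : M ∈ pvEN (lim * lim) := pvEN_complete _ M hM1 hMle hpalM
    rcases hfind : (pvEN (lim * lim)).find? Q with _ | q
    · exact absurd hQM (List.find?_eq_none.1 hfind M hMmem)
    · have hq1 : Q q = true := List.find?_some hfind
      have hq2 : q ∈ pvEN (lim * lim) := List.mem_of_find?_eq_some hfind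
      obtain ⟨hq3, _, hq5⟩ := pvEN_sound _ q hq2
      have hfactq : pvFact lim q :=
        (pvHasFactorPair_iff q lim hq3).1 (by rw [← hQdef]; exact hq1)
      have hle1 : q ≤ M := pvOuterN_ub lim 0 q hq5 hfactq
      have hle2 : M ≤ q := pvFind_first_ge (pvEN_sorted _) hMmem hQM hfind
      simp [le_antisymm hle1 hle2]



-- ===== VERDICT (by name: the statement is the Claim_ definition above) =====
theorem largest_three_digit_palindromic_refactor_spec : Claim_equal_largest_three_digit_palindromic_refactor := by
  intro limit _
  unfold Spec_largest_three_digit_palindromic_refactor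
  exact pvMain limit
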